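-- pv_equiv track=rewrite | github.com/80avin/mmdflux | scripts/generate-rust-module-deps-scc.py | expand_use_tree
-- ===== SOURCE A (Python) =====
-- def split_top_level_commas(value: str) -> list[str]:
--     parts: list[str] = []
--     current: list[str] = []
--     depth = 0
--
--     for ch in value:
--         if ch == "{":
--             depth += 1
--         elif ch == "}":
--             depth -= 1
--         elif ch == "," and depth == 0:
--             piece = "".join(current).strip()
--             if piece:
--                 parts.append(piece)
--             current = []
--             continue
--         current.append(ch)
--
--     tail = "".join(current).strip()
--     if tail:
--         parts.append(tail)
--     return parts
--
-- def expand_use_tree(expr: str, prefix: str = "") -> list[str]: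
--     expr = " ".join(expr.split())
--     expr = expr.strip()
--     if not expr:
--         return []
--
--     if expr.startswith("{") and expr.endswith("}"):
--         inner = expr[1:-1]
--         expanded: list[str] = []
--         for part in split_top_level_commas(inner):
--             expanded.extend(expand_use_tree(part, prefix))
--         return expanded
--
--     expr = expr.split(" as ", 1)[0].strip()
--     brace_index = expr.find("{")
--     if brace_index >= 0:
--         base = expr[:brace_index].rstrip(":").strip()
--         inner = expr[brace_index + 1 : expr.rfind("}")]
--         next_prefix = f"{prefix}::{base}" if prefix else base
--         expanded: list[str] = []
--         for part in split_top_level_commas(inner):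
--             expanded.extend(expand_use_tree(part, next_prefix))
--         return expanded
--
--     return [f"{prefix}::{expr}" if prefix else expr]
-- ===== SOURCE B (Python) =====
-- def split_top_level_commas(value: str) -> list[str]:
--     parts: list[str] = []
--     current: list[str] = []
--     depth = 0
--
--     for ch in value:
--         if ch == "{":
--             depth += 1
--         elif ch == "}":
--             depth -= 1
--         elif ch == "," and depth == 0:
--             piece = "".join(current).strip()
--             if piece:
--                 parts.append(piece)
--             current = []
--             continue
--         current.append(ch)
--
--     tail = "".join(current).strip()
--     if tail:
--         parts.append(tail)
--     return parts
--
--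
-- def _step_item(item: str, pre: str):
--     """Process one stack item: normalize it and either emit a leaf path or
--     produce the child (item, prefix) pairs, left-to-right."""
--     item = " ".join(item.split())
--     item = item.strip()
--     if not item:
--         return ([], None)
--     if item.startswith("{") and item.endswith("}"):
--         return ([(part, pre) for part in split_top_level_commas(item[1:-1])], None)
--     item = item.split(" as ", 1)[0].strip()
--     brace_index = item.find("{")
--     if brace_index >= 0:
--         base = item[:brace_index].rstrip(":").strip()
--         inner = item[brace_index + 1 : item.rfind("}")]
--         next_prefix = f"{pre}::{base}" if pre else base
--         return ([(part, next_prefix) for part in split_top_level_commas(inner)], None)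
--     return ([], f"{pre}::{item}" if pre else item)
--
--
-- def expand_use_tree(expr: str, prefix: str = "") -> list[str]:
--     # Iterative DFS with an explicit LIFO stack instead of recursion; children
--     # are pushed reversed so leaves come out in the same left-to-right order.
--     results: list[str] = []
--     stack: list[tuple[str, str]] = [(expr, prefix)]
--     while stack:
--         item, pre = stack.pop()
--         new_items, out = _step_item(item, pre)
--         if out is not None:
--             results.append(out)
--         stack.extend(reversed(new_items))
--     return results
-- ===== Notes on version B (the rewrite author's own statement) =====
-- stated objective: alternative
-- what changed: expand_use_tree is rewritten as an iterative DFS: an explicit LIFO stack of (item, prefix) pairs with a per-item step helper and a result accumulator replaces A's recursion, children being pushed in reverse to keep the left-to-right leaf order; split_top_level_commas is unchanged.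
import Mathlib
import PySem

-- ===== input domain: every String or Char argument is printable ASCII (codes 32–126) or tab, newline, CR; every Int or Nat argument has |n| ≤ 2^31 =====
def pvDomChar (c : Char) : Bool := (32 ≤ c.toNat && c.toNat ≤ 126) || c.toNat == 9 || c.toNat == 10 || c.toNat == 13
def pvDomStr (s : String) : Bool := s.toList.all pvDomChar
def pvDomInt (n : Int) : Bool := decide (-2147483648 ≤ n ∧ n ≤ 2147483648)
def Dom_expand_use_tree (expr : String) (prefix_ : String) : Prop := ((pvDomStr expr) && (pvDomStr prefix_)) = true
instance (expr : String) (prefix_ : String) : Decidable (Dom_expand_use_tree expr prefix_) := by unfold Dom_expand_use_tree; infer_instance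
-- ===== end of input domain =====

-- B replaces A's recursion by an iterative DFS: an explicit LIFO stack of (item, prefix)
-- pairs, a per-item step helper, and a result accumulator; same split_top_level_commas.

-- ===== PORT A =====

-- shared helper: literal port of split_top_level_commas (state = (parts, current, depth))
def splitTopLevelCommas (value : String) : List String :=
  let st : List String × List Char × Int :=
    value.toList.foldl (fun (s : List String × List Char × Int) ch =>
      let parts := s.1; let current := s.2.1; let depth := s.2.2
      if ch = '{' then (parts, current ++ [ch], depth + 1)
      else if ch = '}' then (parts, current ++ [ch], depth - 1)
      else if ch = ',' ∧ depth = 0 then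
        let piece := PySem.Chars.strip current
        (if piece ≠ [] then parts ++ [String.ofList piece] else parts, [], depth)
      else (parts, current ++ [ch], depth)) ([], [], 0)
  let tail := PySem.Chars.strip st.2.1
  if tail ≠ [] then st.1 ++ [String.ofList tail] else st.1

-- hand port of Python's s.rstrip(":") (PySem has no rstrip-with-chars); exact: drops trailing ':'
def rstripColon (s : String) : String :=
  String.ofList ((s.toList.reverse.dropWhile (fun c => c = ':')).reverse)

-- literal port of A's recursive expand_use_tree; the fuel argument only makes the
-- recursion structural (seeded with len+1, which always suffices: every level strips a brace)
def expandGoA (fuel : Nat) (expr : String) (prefix_ : String) : List String :=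
  match fuel with
  | 0 => []
  | f + 1 =>
    let e0 := PySem.Str.join " " (PySem.Str.split₀ expr)
    let e := PySem.Str.strip e0
    if e.toList = [] then []
    else if PySem.Str.startswith e "{" && PySem.Str.endswith e "}" then
      let inner := PySem.Str.slice e (some 1) (some (-1))
      (splitTopLevelCommas inner).foldl (fun acc part => acc ++ expandGoA f part prefix_) []
    else
      let e2 := PySem.Str.strip
        (match PySem.Str.splitMax? e " as " 1 with
         | some (x :: _) => x
         | _ => e)
      let braceIndex := PySem.Str.find e2 "{"
      if 0 ≤ braceIndex then
        let base := PySem.Str.strip (rstripColon (PySem.Str.slice e2 none (some braceIndex)))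
        let inner := PySem.Str.slice e2 (some (braceIndex + 1)) (some (PySem.Str.rfind e2 "}"))
        let nextPrefix := if prefix_.toList ≠ [] then prefix_ ++ "::" ++ base else base
        (splitTopLevelCommas inner).foldl (fun acc part => acc ++ expandGoA f part nextPrefix) []
      else
        [if prefix_.toList ≠ [] then prefix_ ++ "::" ++ e2 else e2]

def expand_use_tree (expr : String) (prefix_ : String) : List String :=
  expandGoA (expr.toList.length + 1) expr prefix_

-- ===== PORT B =====

-- literal port of _step_item: normalize one stack item and either emit a leaf path or
-- produce the child (item, prefix) pairs left-to-right (children carry one fuel less;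
-- the fuel only guards the loop, mirroring expandGoA's)
def stepItem (fuel : Nat) (item0 : String) (pre : String) :
    List (Nat × String × String) × Option String :=
  match fuel with
  | 0 => ([], none)
  | f + 1 =>
    let i0 := PySem.Str.join " " (PySem.Str.split₀ item0)
    let item := PySem.Str.strip i0
    if item.toList = [] then ([], none)
    else if PySem.Str.startswith item "{" && PySem.Str.endswith item "}" then
      ((splitTopLevelCommas (PySem.Str.slice item (some 1) (some (-1)))).map
        (fun part => (f, part, pre)), none)
    else
      let i2 := PySem.Str.strip
        (match PySem.Str.splitMax? item " as " 1 with
         | some (x :: _) => x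
         | _ => item)
      let braceIndex := PySem.Str.find i2 "{"
      if 0 ≤ braceIndex then
        let base := PySem.Str.strip (rstripColon (PySem.Str.slice i2 none (some braceIndex)))
        let inner := PySem.Str.slice i2 (some (braceIndex + 1)) (some (PySem.Str.rfind i2 "}"))
        let nextPrefix := if pre.toList ≠ [] then pre ++ "::" ++ base else base
        ((splitTopLevelCommas inner).map (fun part => (f, part, nextPrefix)), none)
      else ([], some (if pre.toList ≠ [] then pre ++ "::" ++ i2 else i2))

-- termination measure for B's loop: the size of A's call tree rooted at one stack item
def itemCount (fuel : Nat) (e : String) (p : String) : Nat :=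
  match fuel with
  | 0 => 1
  | f + 1 => 1 + (((stepItem (f + 1) e p).1).map (fun t => itemCount f t.2.1 t.2.2)).sum

def stackMeasure (stack : List (Nat × String × String)) : Nat :=
  (stack.map (fun t => itemCount t.1 t.2.1 t.2.2)).sum

-- every child produced by stepItem (f+1) carries fuel f
lemma stepItem_fuel (f : Nat) (i p : String) :
    ∀ t ∈ (stepItem (f + 1) i p).1, t.1 = f := by
  simp only [stepItem]
  split_ifs <;> intro t ht <;> simp_all <;> obtain ⟨part, -, rfl⟩ := ht <;> rfl

lemma stepItem_measure (fuel : Nat) (i p : String) :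
    stackMeasure (stepItem fuel i p).1 < itemCount fuel i p := by
  cases fuel with
  | zero => simp [stepItem, stackMeasure, itemCount]
  | succ f =>
    have hf := stepItem_fuel f i p
    have : stackMeasure (stepItem (f + 1) i p).1
        = (((stepItem (f + 1) i p).1).map (fun t => itemCount f t.2.1 t.2.2)).sum := by
      unfold stackMeasure
      exact congrArg List.sum (List.map_congr_left (fun t ht => by rw [hf t ht]))
    rw [this]
    conv_rhs => rw [itemCount]
    omega

lemma stackMeasure_append (a b : List (Nat × String × String)) :
    stackMeasure (a ++ b) = stackMeasure a + stackMeasure b := by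
  simp [stackMeasure]

-- literal port of B's while-loop: pop an item, run the step, append its output,
-- put its children on top (the Lean stack is head-topped, so Python's
-- 'stack.extend(reversed(new_items))' is list append on the left)
def expandGoB (stack : List (Nat × String × String)) (results : List String) : List String :=
  match stack with
  | [] => results
  | (fuel, item0, pre) :: rest =>
    let r := stepItem fuel item0 pre
    expandGoB (r.1 ++ rest)
      (match r.2 with
       | none => results
       | some out => results ++ [out])
  termination_by stackMeasure stack
  decreasing_by
  have h := stepItem_measure fuel item0 pre
  rw [stackMeasure_append]
  simp only [stackMeasure, List.map_cons, List.sum_cons] at h ⊢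
  omega

def expand_use_tree_alt (expr : String) (prefix_ : String) : List String :=
  expandGoB [(expr.toList.length + 1, expr, prefix_)] []

-- ===== PRECONDITION & SPEC =====
def Spec_expand_use_tree (expr : String) (prefix_ : String) (out : List String) : Prop := out = expand_use_tree_alt expr prefix_
instance (expr : String) (prefix_ : String) (out : List String) : Decidable (Spec_expand_use_tree expr prefix_ out) := by unfold Spec_expand_use_tree; infer_instance

-- ===== CLAIM (what is proved, stated in full; the proofs are below) =====
def Claim_equal_expand_use_tree : Prop := ∀ (expr : String) (prefix_ : String), Dom_expand_use_tree expr prefix_ → Spec_expand_use_tree expr prefix_ (expand_use_tree expr prefix_)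

-- ===== LEMMAS AND PROOFS =====

-- one step of A, phrased through B's step helper
lemma expandGoA_eq_step (fuel : Nat) (i p : String) :
    expandGoA fuel i p =
      (match (stepItem fuel i p).2 with
       | none => []
       | some out => [out])
      ++ (((stepItem fuel i p).1).map (fun t => expandGoA t.1 t.2.1 t.2.2)).flatten := by
  cases fuel with
  | zero => simp [expandGoA, stepItem]
  | succ f =>
    simp only [expandGoA, stepItem]
    split_ifs <;> simp [List.map_map, Function.comp_def]

lemma itemCount_pos (fuel : Nat) (e p : String) : 1 ≤ itemCount fuel e p := by
  cases fuel <;> simp [itemCount]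

-- the stack loop computes the concatenation of A's results over the stack
lemma expandGoB_eq_aux (n : Nat) : ∀ (stack : List (Nat × String × String)) (results : List String),
    stackMeasure stack ≤ n →
    expandGoB stack results
      = results ++ (stack.map (fun t => expandGoA t.1 t.2.1 t.2.2)).flatten := by
  induction n with
  | zero =>
    intro stack results h
    match stack with
    | [] => simp [expandGoB]
    | (fuel, item0, pre) :: rest =>
      exfalso
      have := itemCount_pos fuel item0 pre
      simp only [stackMeasure, List.map_cons, List.sum_cons] at h
      omega
  | succ n ih =>
    intro stack results h
    match stack with
    | [] => simp [expandGoB]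
    | (fuel, item0, pre) :: rest =>
      rw [expandGoB]
      have hm := stepItem_measure fuel item0 pre
      have hrest : stackMeasure ((stepItem fuel item0 pre).1 ++ rest) ≤ n := by
        rw [stackMeasure_append]
        simp only [stackMeasure, List.map_cons, List.sum_cons] at h hm ⊢
        omega
      rw [ih _ _ hrest]
      simp only [List.map_append, List.flatten_append, List.map_cons, List.flatten_cons]
      rw [expandGoA_eq_step fuel item0 pre]
      cases (stepItem fuel item0 pre).2 <;> simp [List.append_assoc]

lemma expandGoB_eq (stack : List (Nat × String × String)) (results : List String) :
    expandGoB stack results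
      = results ++ (stack.map (fun t => expandGoA t.1 t.2.1 t.2.2)).flatten :=
  expandGoB_eq_aux (stackMeasure stack) stack results (le_refl _)

-- ===== VERDICT (by name: the statement is the Claim_ definition above) =====
theorem expand_use_tree_spec : Claim_equal_expand_use_tree := by
  intro expr prefix_ _
  unfold Spec_expand_use_tree expand_use_tree expand_use_tree_alt
  rw [expandGoB_eq]
  simp
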